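-- pv_equiv track=rewrite | github.com/AhmeedAdelMahmoud/HQECC-Threshold | hyperbolic_code_threshold.py | get_logical_error
-- ===== SOURCE A (Python) =====
-- def get_edge_from_v1_v2(v1: int, v2: int, vertices_to_edges: dict):
--     """Takes labels for two vertices for an edge and returns the corresponding edge label.
--     Edge labels are easier to work and debug with."""
--     tup = tuple(sorted((v1, v2)))
--     return vertices_to_edges[tup]
--
-- def logical_operators_to_edges(logical_operators: list, vertices_to_edges: dict):
--     """Convert logical operators from a list of pairs of vertices (v1,v2) to edge labels."""
--     logical_operators_edges = []
--
--     for logical_operator in logical_operators: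
--         lg_edges = set()
--         for pair in logical_operator:
--             lg_edges.add(
--                 get_edge_from_v1_v2(pair[0], pair[1], vertices_to_edges))
--         logical_operators_edges.append(lg_edges)
--     return logical_operators_edges
--
-- def get_logical_error(affected_edges: list, correction_paths: list, vertices_to_edges: dict, logical_operators: list):
--     logical_operators_edges = logical_operators_to_edges(logical_operators, vertices_to_edges)
--
--     affected_edges_set = set(affected_edges)
--     all_correction_edges = set()
--     for correction_path in correction_paths:
--         for i in range(len(correction_path) - 1):
--             all_correction_edges.add(get_edge_from_v1_v2(correction_path[i], correction_path[i + 1], vertices_to_edges))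
--
--     if all_correction_edges == affected_edges_set:
--         return False
--
--     # remove the common edges between affected and correction edges
--     potential_logical_error = all_correction_edges.symmetric_difference(affected_edges_set)
--
--     for logical_operator in logical_operators_edges:
--         common_edges = potential_logical_error.intersection(logical_operator)
--         if len(common_edges) % 2 == 1:
--             return True
--
--     return False
-- ===== SOURCE B (Python) =====
-- def get_logical_error(affected_edges: list, correction_paths: list, vertices_to_edges: dict, logical_operators: list):
--     def edge(v, w):
--         return vertices_to_edges[(v, w) if v <= w else (w, v)]
--
--     # Inverted index: edge label -> indices of the logical operators containing it
--     # (each operator's edges deduplicated first, keeping first-occurrence order).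
--     edge_to_ops = {}
--     for i, op in enumerate(logical_operators):
--         for e in dict.fromkeys(edge(v, w) for v, w in op):
--             edge_to_ops.setdefault(e, []).append(i)
--
--     affected = set(affected_edges)
--     correction = set()
--     for path in correction_paths:
--         for v, w in zip(path, path[1:]):
--             correction.add(edge(v, w))
--
--     # One pass over the indexed edges: an edge is part of the total error
--     # (affected XOR correction) iff it lies in exactly one of the two sets;
--     # each such edge flips the parity of every operator that contains it.
--     parity = [0] * len(logical_operators)
--     for e in edge_to_ops:
--         if (e in affected) != (e in correction):
--             for i in edge_to_ops[e]:
--                 parity[i] = 1 - parity[i]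
--     return any(parity)
-- ===== Notes on version B (the rewrite author's own statement) =====
-- stated objective: alternative
-- what changed: B replaces A's set algebra (symmetric difference, then per-operator intersections) with an inverted index mapping each edge to the operator indices containing it and a single pass over the indexed edges that flips a per-operator parity bit for every edge lying in exactly one of affected/correction, finally returning whether any parity bit is set.
import Mathlib
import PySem

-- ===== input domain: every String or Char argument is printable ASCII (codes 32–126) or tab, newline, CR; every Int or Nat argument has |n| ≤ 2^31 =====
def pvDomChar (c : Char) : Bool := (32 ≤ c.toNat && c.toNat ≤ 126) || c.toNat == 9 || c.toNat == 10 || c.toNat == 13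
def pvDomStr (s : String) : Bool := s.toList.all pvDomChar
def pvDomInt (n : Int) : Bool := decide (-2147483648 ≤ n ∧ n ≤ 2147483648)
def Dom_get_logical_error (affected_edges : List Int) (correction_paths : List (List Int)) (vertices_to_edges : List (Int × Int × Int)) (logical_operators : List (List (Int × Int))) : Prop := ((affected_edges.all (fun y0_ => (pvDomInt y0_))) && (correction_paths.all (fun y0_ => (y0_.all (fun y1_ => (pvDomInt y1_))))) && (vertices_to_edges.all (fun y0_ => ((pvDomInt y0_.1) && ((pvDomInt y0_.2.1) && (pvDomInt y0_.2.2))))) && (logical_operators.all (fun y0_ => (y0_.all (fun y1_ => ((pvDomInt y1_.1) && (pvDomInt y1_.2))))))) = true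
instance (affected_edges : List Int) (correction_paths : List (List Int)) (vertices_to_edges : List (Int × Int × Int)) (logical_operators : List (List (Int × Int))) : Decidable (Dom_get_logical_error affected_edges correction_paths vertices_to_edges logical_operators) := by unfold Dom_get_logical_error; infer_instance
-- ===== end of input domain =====

-- B replaces A's set algebra (symmetric difference + per-operator intersections) by an
-- inverted index edge -> operator indices and a single parity-flipping pass over the indexed edges.


-- ===== PORT A =====
-- get_edge_from_v1_v2: dict lookup under key tuple(sorted((v1,v2))); totalized with
-- default 0 — Pre_ excludes the missing-key (KeyError) inputs.
def pvEdgeA (vertices_to_edges : List (Int × Int × Int)) (v1 v2 : Int) : Int :=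
  ((vertices_to_edges.find? (fun e => e.1 == min v1 v2 && e.2.1 == max v1 v2)).map (fun e => e.2.2)).getD 0

def get_logical_error (affected_edges : List Int) (correction_paths : List (List Int)) (vertices_to_edges : List (Int × Int × Int)) (logical_operators : List (List (Int × Int))) : Bool :=
  -- logical_operators_to_edges
  let logical_operators_edges : List (PySem.Set Int) := logical_operators.map (fun logical_operator =>
      logical_operator.foldl (fun lg_edges pair => PySem.Set.add lg_edges (pvEdgeA vertices_to_edges pair.1 pair.2)) PySem.Set.empty)
  let affected_edges_set : PySem.Set Int := PySem.Set.ofList affected_edges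
  let all_correction_edges : PySem.Set Int := correction_paths.foldl (fun s correction_path =>
      (PySem.List.pyRange 0 ((correction_path.length : Int) - 1) 1).foldl
        (fun s i => PySem.Set.add s (pvEdgeA vertices_to_edges (PySem.List.pyGetD correction_path i 0) (PySem.List.pyGetD correction_path (i + 1) 0))) s)
      PySem.Set.empty
  if PySem.Set.equal all_correction_edges affected_edges_set then false
  else
    let potential_logical_error := PySem.Set.symmDiff all_correction_edges affected_edges_set
    -- for-loop with early 'return True' = List.any
    logical_operators_edges.any (fun logical_operator =>
      (PySem.Set.inter potential_logical_error logical_operator).length % 2 == 1)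

-- ===== PORT B =====
-- vertices_to_edges[(v,w) if v <= w else (w,v)], totalized with default 0 (Pre_ excludes KeyError)
def pvEdgeB (vertices_to_edges : List (Int × Int × Int)) (a b : Int) : Int :=
  let k := if a ≤ b then (a, b) else (b, a)
  ((vertices_to_edges.find? (fun e => e.1 == k.1 && e.2.1 == k.2)).map (fun e => e.2.2)).getD 0

def get_logical_error_alt (affected_edges : List Int) (correction_paths : List (List Int)) (vertices_to_edges : List (Int × Int × Int)) (logical_operators : List (List (Int × Int))) : Bool :=
  -- inverted index: edge -> operator indices containing it (setdefault(e,[]).append(i) = modify e [] (· ++ [i]))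
  let edge_to_ops : PySem.Dict Int (List Int) :=
    (PySem.List.enumerate logical_operators).foldl
      (fun d iop =>
        (PySem.List.dedup (iop.2.map (fun p => pvEdgeB vertices_to_edges p.1 p.2))).foldl
          (fun d e => d.modify e [] (· ++ [iop.1])) d)
      PySem.Dict.empty
  let affected : PySem.Set Int := PySem.Set.ofList affected_edges
  let correction : PySem.Set Int :=
    correction_paths.foldl (fun s path =>
      (path.zip path.tail).foldl (fun s vw => PySem.Set.add s (pvEdgeB vertices_to_edges vw.1 vw.2)) s)
      PySem.Set.empty
  let parity0 : List Int := List.replicate logical_operators.length 0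
  let parity := edge_to_ops.keys.foldl
    (fun par e =>
      if PySem.Set.contains affected e != PySem.Set.contains correction e then
        (edge_to_ops.getD e []).foldl
          (fun par i => PySem.List.pySetD par i (1 - PySem.List.pyGetD par i 0)) par
      else par)
    parity0
  parity.any (fun p => !(p == 0))

-- ===== PRECONDITION & SPEC =====
-- Pre_ excludes exactly the inputs where a dict lookup misses (Python raises KeyError):
-- every sorted vertex pair used by a logical operator or by consecutive path vertices
-- must be a key of vertices_to_edges.
def Pre_get_logical_error (affected_edges : List Int) (correction_paths : List (List Int)) (vertices_to_edges : List (Int × Int × Int)) (logical_operators : List (List (Int × Int))) : Prop :=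
  (∀ lo ∈ logical_operators, ∀ p ∈ lo,
      (vertices_to_edges.any (fun e => e.1 == min p.1 p.2 && e.2.1 == max p.1 p.2)) = true) ∧
  (∀ cp ∈ correction_paths, ∀ ab ∈ cp.zip cp.tail,
      (vertices_to_edges.any (fun e => e.1 == min ab.1 ab.2 && e.2.1 == max ab.1 ab.2)) = true)
instance (affected_edges : List Int) (correction_paths : List (List Int)) (vertices_to_edges : List (Int × Int × Int)) (logical_operators : List (List (Int × Int))) : Decidable (Pre_get_logical_error affected_edges correction_paths vertices_to_edges logical_operators) := by unfold Pre_get_logical_error; infer_instance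

def pvWitness_get_logical_error : List Int × List (List Int) × (List (Int × Int × Int)) × (List (List (Int × Int))) :=
  ([1], [[0, 1]], [(0, 1, 1), (1, 2, 2)], [[(1, 2)]])

def Spec_get_logical_error (affected_edges : List Int) (correction_paths : List (List Int)) (vertices_to_edges : List (Int × Int × Int)) (logical_operators : List (List (Int × Int))) (out : Bool) : Prop := out = get_logical_error_alt affected_edges correction_paths vertices_to_edges logical_operators
instance (affected_edges : List Int) (correction_paths : List (List Int)) (vertices_to_edges : List (Int × Int × Int)) (logical_operators : List (List (Int × Int))) (out : Bool) : Decidable (Spec_get_logical_error affected_edges correction_paths vertices_to_edges logical_operators out) := by unfold Spec_get_logical_error; infer_instance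

-- ===== CLAIM (what is proved, stated in full; the proofs are below) =====
def Claim_equal_get_logical_error : Prop := ∀ (affected_edges : List Int) (correction_paths : List (List Int)) (vertices_to_edges : List (Int × Int × Int)) (logical_operators : List (List (Int × Int))), Dom_get_logical_error affected_edges correction_paths vertices_to_edges logical_operators → Pre_get_logical_error affected_edges correction_paths vertices_to_edges logical_operators → Spec_get_logical_error affected_edges correction_paths vertices_to_edges logical_operators (get_logical_error affected_edges correction_paths vertices_to_edges logical_operators)

-- ===== LEMMAS AND PROOFS =====

-- proof-only abbreviations (B-shaped intermediate values)
def pvCorr (d : List (Int × Int × Int)) (cps : List (List Int)) : PySem.Set Int :=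
  cps.foldl (fun s path =>
      (path.zip path.tail).foldl (fun s ab => PySem.Set.add s (pvEdgeB d ab.1 ab.2)) s) PySem.Set.empty

def pvOpSet (d : List (Int × Int × Int)) (op : List (Int × Int)) : PySem.Set Int :=
  PySem.Set.ofList (op.map (fun p => pvEdgeB d p.1 p.2))

def pvSym (d : List (Int × Int × Int)) (aff : List Int) (cps : List (List Int)) : PySem.Set Int :=
  PySem.Set.symmDiff (pvCorr d cps) (PySem.Set.ofList aff)

-- the (edge, operator-index) pairs fed into the inverted index, starting at index s
def pvLp (d : List (Int × Int × Int)) : List (List (Int × Int)) → Int → List (Int × Int)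
  | [], _ => []
  | op :: t, s => (pvOpSet d op).map (fun e => (e, s)) ++ pvLp d t (s + 1)

-- the inverted-index dict built from the enumerated operators
def pvBuildE (d : List (Int × Int × Int)) (E : List (Int × List (Int × Int))) (d0 : PySem.Dict Int (List Int)) : PySem.Dict Int (List Int) :=
  E.foldl
    (fun dd iop =>
      (PySem.List.dedup (iop.2.map (fun p => pvEdgeB d p.1 p.2))).foldl
        (fun dd e => dd.modify e [] (· ++ [iop.1])) dd) d0

theorem pvEdge_eq (d : List (Int × Int × Int)) (a b : Int) : pvEdgeA d a b = pvEdgeB d a b := by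
  unfold pvEdgeA pvEdgeB
  rcases le_or_gt a b with h | h
  · simp [min_eq_left h, max_eq_right h, if_pos h]
  · simp [min_eq_right h.le, max_eq_left h.le, if_neg (not_le.mpr h)]

theorem range_pairs (cp : List Int) :
    (List.range (cp.length - 1)).map (fun i => (cp.getD i 0, cp.getD (i + 1) 0)) = cp.zip cp.tail := by
  induction cp with
  | nil => simp
  | cons x t ih =>
    cases t with
    | nil => simp
    | cons y t' =>
      have h : (x :: y :: t').length - 1 = t'.length + 1 := by simp
      rw [h, List.range_succ_eq_map, List.map_cons, List.map_map]
      have h2 : ((y :: t').length - 1) = t'.length := by simp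
      simp only [List.getD_cons_zero, List.getD_cons_succ, Function.comp_def]
      rw [show (y :: t').tail = t' from rfl] at ih
      rw [h2] at ih
      simpa using congrArg (List.cons (x, y)) ih

theorem foldl_range_zip {σ : Type} (cp : List Int) (F : σ → Int → Int → σ) (s : σ) :
    (List.range (cp.length - 1)).foldl (fun s i => F s (cp.getD i 0) (cp.getD (i + 1) 0)) s
      = (cp.zip cp.tail).foldl (fun s ab => F s ab.1 ab.2) s := by
  conv_rhs => rw [← range_pairs, List.foldl_map]

theorem corr_inner_eq (d : List (Int × Int × Int)) (cp : List Int) (s : PySem.Set Int) :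
    (PySem.List.pyRange 0 ((cp.length : Int) - 1) 1).foldl
        (fun s i => PySem.Set.add s (pvEdgeA d (PySem.List.pyGetD cp i 0) (PySem.List.pyGetD cp (i + 1) 0))) s
      = (cp.zip cp.tail).foldl (fun s ab => PySem.Set.add s (pvEdgeB d ab.1 ab.2)) s := by
  have hr : PySem.List.pyRange 0 ((cp.length : Int) - 1) 1
      = (List.range (cp.length - 1)).map (fun k : Nat => (k : Int)) := by
    cases cp with
    | nil => decide
    | cons x t =>
      have h : ((x :: t).length : Int) - 1 = ((t.length : Nat) : Int) := by simp
      have h' : (x :: t).length - 1 = t.length := by simp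
      rw [h, h', PySem.List.pyRange_zero_natCast]
  rw [hr, List.foldl_map]
  have hcast : ∀ k : Nat, ((k : Int) + 1) = ((k + 1 : Nat) : Int) := by intro k; push_cast; ring
  simp only [hcast, PySem.List.pyGetD_natCast, pvEdge_eq]
  exact foldl_range_zip cp (fun s a b => PySem.Set.add s (pvEdgeB d a b)) s

theorem nodup_foldl_add {β : Type} (f : β → Int) (l : List β) (s : PySem.Set Int) (h : s.Nodup) :
    (l.foldl (fun s x => PySem.Set.add s (f x)) s).Nodup := by
  induction l generalizing s with
  | nil => simpa
  | cons x t ih => exact ih _ (PySem.Set.nodup_add _ _ h)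

theorem nodup_foldl_paths (g : Int → Int → Int) (cps : List (List Int)) :
    ∀ (s : PySem.Set Int), s.Nodup → (cps.foldl (fun s path =>
      (path.zip path.tail).foldl (fun s ab => PySem.Set.add s (g ab.1 ab.2)) s) s).Nodup := by
  induction cps with
  | nil => intro s h; simpa
  | cons p t ih =>
    intro s h
    apply ih
    exact nodup_foldl_add (fun ab => g ab.1 ab.2) (p.zip p.tail) s h

theorem nodup_pvCorr (d : List (Int × Int × Int)) (cps : List (List Int)) : (pvCorr d cps).Nodup :=
  nodup_foldl_paths (pvEdgeB d) cps PySem.Set.empty List.nodup_nil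

-- A rewritten with B's intermediate sets (A's index loop enumerates zip(cp, cp[1:]))
theorem A_eq (affected_edges : List Int) (correction_paths : List (List Int)) (vertices_to_edges : List (Int × Int × Int)) (logical_operators : List (List (Int × Int))) :
    get_logical_error affected_edges correction_paths vertices_to_edges logical_operators
      = (if PySem.Set.equal (pvCorr vertices_to_edges correction_paths) (PySem.Set.ofList affected_edges) then false
         else logical_operators.any (fun op =>
           (PySem.Set.inter (pvSym vertices_to_edges affected_edges correction_paths) (pvOpSet vertices_to_edges op)).length % 2 == 1)) := by
  unfold get_logical_error
  have hcorr : correction_paths.foldl (fun s correction_path =>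
      (PySem.List.pyRange 0 ((correction_path.length : Int) - 1) 1).foldl
        (fun s i => PySem.Set.add s (pvEdgeA vertices_to_edges (PySem.List.pyGetD correction_path i 0) (PySem.List.pyGetD correction_path (i + 1) 0))) s)
      PySem.Set.empty = pvCorr vertices_to_edges correction_paths := by
    unfold pvCorr
    apply PySem.List.foldl_congr_mem
    intro acc cp _
    exact corr_inner_eq vertices_to_edges cp acc
  have hops : ∀ op : List (Int × Int),
      op.foldl (fun lg_edges pair => PySem.Set.add lg_edges (pvEdgeA vertices_to_edges pair.1 pair.2)) PySem.Set.empty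
        = pvOpSet vertices_to_edges op := by
    intro op
    unfold pvOpSet
    rw [PySem.Set.ofList_eq_foldl, List.foldl_map]
    apply PySem.List.foldl_congr_mem
    intro acc p _
    rw [pvEdge_eq]
  simp only [hcorr, List.any_map, Function.comp_def, hops, pvSym]

def pvD (d : List (Int × Int × Int)) (los : List (List (Int × Int))) : PySem.Dict Int (List Int) :=
  pvBuildE d (PySem.List.enumerate los) PySem.Dict.empty

-- B's inner parity-toggle loop
def pvTog (par : List Int) (is : List Int) : List Int :=
  is.foldl (fun par i => PySem.List.pySetD par i (1 - PySem.List.pyGetD par i 0)) par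

theorem pvLp_snd_bounds (d : List (Int × Int × Int)) (los : List (List (Int × Int))) :
    ∀ (s : Int) (q : Int × Int), q ∈ pvLp d los s → s ≤ q.2 ∧ q.2 < s + los.length := by
  induction los with
  | nil => intro s q hq; simp [pvLp] at hq
  | cons op t ih =>
    intro s q hq
    rw [pvLp, List.mem_append] at hq
    have hlen : ((op :: t).length : Int) = (t.length : Int) + 1 := by
      rw [List.length_cons]; push_cast; ring
    rcases hq with hq | hq
    · obtain ⟨e, -, rfl⟩ := List.mem_map.mp hq
      refine ⟨le_refl _, ?_⟩
      rw [hlen]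
      have : (0 : Int) ≤ (t.length : Int) := by positivity
      omega
    · have h := ih (s + 1) q hq
      rw [hlen]
      omega

theorem countP_pvLp (d : List (Int × Int × Int)) (los : List (List (Int × Int))) :
    ∀ (s : Int) (j : Nat) (e : Int),
      (pvLp d los s).countP (fun q => q.1 == e && q.2 == s + (j : Int))
        = if j < los.length ∧ e ∈ pvOpSet d (los.getD j []) then 1 else 0 := by
  induction los with
  | nil => intro s j e; simp [pvLp]
  | cons op t ih =>
    intro s j e
    rw [pvLp, List.countP_append, List.countP_map]
    have hcomp : ∀ (jj : Int), ((fun q : Int × Int => q.1 == e && q.2 == s + jj) ∘ fun e => (e, s))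
        = fun e' : Int => e' == e && (s == s + jj) := by intro jj; funext e'; rfl
    rw [hcomp]
    cases j with
    | zero =>
      have hhead : (pvOpSet d op).countP (fun e' => e' == e && (s == s + ((0 : Nat) : Int)))
          = if e ∈ pvOpSet d op then 1 else 0 := by
        have hcongr : (pvOpSet d op).countP (fun e' => e' == e && (s == s + ((0 : Nat) : Int)))
            = (pvOpSet d op).countP (· == e) := by
          apply List.countP_congr; intro a _; simp
        rw [hcongr]
        by_cases hm : e ∈ pvOpSet d op
        · rw [if_pos hm]
          exact List.count_eq_one_of_mem (PySem.Set.nodup_ofList _) hm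
        · rw [if_neg hm]
          exact List.count_eq_zero_of_not_mem hm
      have htail : (pvLp d t (s + 1)).countP (fun q => q.1 == e && q.2 == s + ((0 : Nat) : Int)) = 0 := by
        rw [List.countP_eq_zero]
        intro q hq
        have := pvLp_snd_bounds d t (s + 1) q hq
        simp only [Nat.cast_zero, add_zero, Bool.and_eq_true, beq_iff_eq]
        rintro ⟨-, rfl⟩
        omega
      rw [hhead, htail]
      simp only [List.getD_cons_zero, List.length_cons]
      have : (0 < t.length + 1) := by omega
      by_cases hm : e ∈ pvOpSet d op
      · rw [if_pos hm, if_pos ⟨this, hm⟩]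
      · rw [if_neg hm, if_neg (by rintro ⟨-, h⟩; exact hm h)]
    | succ j' =>
      have hhead : (pvOpSet d op).countP (fun e' => e' == e && (s == s + ((j' + 1 : Nat) : Int))) = 0 := by
        rw [List.countP_eq_zero]
        intro a _
        simp only [Bool.and_eq_true, beq_iff_eq, not_and]
        intro _
        omega
      have hcast : s + ((j' + 1 : Nat) : Int) = (s + 1) + (j' : Int) := by push_cast; ring
      rw [hhead, hcast, ih (s + 1) j' e]
      simp only [List.getD_cons_succ, List.length_cons, Nat.zero_add]
      by_cases hc : j' < t.length ∧ e ∈ pvOpSet d (t.getD j' [])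
      · rw [if_pos hc, if_pos ⟨by omega, hc.2⟩]
      · rw [if_neg hc, if_neg (by rintro ⟨h1, h2⟩; exact hc ⟨by omega, h2⟩)]

theorem getD_pvBuildE (d : List (Int × Int × Int)) (E : List (Int × List (Int × Int))) :
    ∀ (d0 : PySem.Dict Int (List Int)) (e : Int),
      (pvBuildE d E d0).getD e []
        = d0.getD e [] ++ ((E.flatMap (fun iop => (pvOpSet d iop.2).map (fun e' => (e', iop.1)))).filter
            (fun q => q.1 == e)).map (·.2) := by
  induction E with
  | nil => intro d0 e; simp [pvBuildE]
  | cons iop t ih =>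
    intro d0 e
    have hsets : PySem.List.dedup (iop.2.map (fun p => pvEdgeB d p.1 p.2)) = pvOpSet d iop.2 := by
      simp [pvOpSet]
    have hstep : pvBuildE d (iop :: t) d0
        = pvBuildE d t ((pvOpSet d iop.2).foldl
            (fun dd e => dd.modify e [] (· ++ [iop.1])) d0) := by
      show pvBuildE d t ((PySem.List.dedup (iop.2.map (fun p => pvEdgeB d p.1 p.2))).foldl
            (fun dd e => dd.modify e [] (· ++ [iop.1])) d0) = _
      rw [hsets]
    rw [hstep, ih]
    have hinner : ∀ (es : List Int) (dd : PySem.Dict Int (List Int)),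
        (es.foldl (fun dd e => dd.modify e [] (· ++ [iop.1])) dd).getD e []
          = dd.getD e [] ++ ((es.map (fun e' => (e', iop.1))).filter (fun q => q.1 == e)).map (·.2) := by
      intro es dd
      have hmap : (es.map (fun e' => (e', iop.1))).foldl (fun dd (p : Int × Int) => dd.modify p.1 [] (· ++ [p.2])) dd
          = es.foldl (fun dd e => dd.modify e [] (· ++ [iop.1])) dd := by
        rw [List.foldl_map]
      rw [← hmap]
      exact PySem.Dict.getD_foldl_modify_append _ _ _
    rw [hinner, List.flatMap_cons, List.filter_append, List.map_append, List.append_assoc]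

theorem nodup_keys_pvBuildE (d : List (Int × Int × Int)) (E : List (Int × List (Int × Int))) :
    ∀ (d0 : PySem.Dict Int (List Int)), d0.keys.Nodup → (pvBuildE d E d0).keys.Nodup := by
  induction E with
  | nil => intro d0 h; simpa [pvBuildE]
  | cons iop t ih =>
    intro d0 h
    exact ih _ (PySem.Dict.nodup_keys_foldl_modify_key _ (fun e => e) [] (fun _ _ => (· ++ [iop.1])) d0 h)

theorem flatMap_enum (d : List (Int × Int × Int)) (los : List (List (Int × Int))) :
    ∀ s, ((PySem.List.enumerate los s).flatMap (fun iop => (pvOpSet d iop.2).map (fun e' => (e', iop.1))))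
      = pvLp d los s := by
  induction los with
  | nil => intro s; simp [pvLp, PySem.List.enumerate_nil]
  | cons op t ih => intro s; rw [PySem.List.enumerate_cons, List.flatMap_cons, ih (s + 1), pvLp]

theorem count_map_snd_filter_fst (L : List (Int × Int)) (e a : Int) :
    ((L.filter (fun q => q.1 == e)).map (·.2)).count a = L.countP (fun q => q.1 == e && q.2 == a) := by
  induction L with
  | nil => rfl
  | cons q t ih =>
    by_cases h1 : q.1 = e <;> by_cases h2 : q.2 = a <;>
      simp [h1, h2, ih]

theorem count_getD_pvD (d : List (Int × Int × Int)) (los : List (List (Int × Int))) (e : Int) (j : Nat) :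
    ((pvD d los).getD e []).count ((j : Nat) : Int)
      = if j < los.length ∧ e ∈ pvOpSet d (los.getD j []) then 1 else 0 := by
  rw [pvD, getD_pvBuildE, flatMap_enum, PySem.Dict.getD_empty, List.nil_append,
    count_map_snd_filter_fst]
  have h := countP_pvLp d los 0 j e
  rw [zero_add] at h
  exact h

theorem mem_keys_pvD (d : List (Int × Int × Int)) (los : List (List (Int × Int))) (j : Nat)
    (hj : j < los.length) (x : Int) (hx : x ∈ pvOpSet d (los.getD j [])) : x ∈ (pvD d los).keys := by
  have hc := count_getD_pvD d los x j
  rw [if_pos ⟨hj, hx⟩] at hc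
  by_contra hmem
  have hcf : (pvD d los).contains x = false := by
    cases hcc : (pvD d los).contains x with
    | false => rfl
    | true => exact absurd ((PySem.Dict.contains_iff_mem_keys _ _).mp hcc) hmem
  rw [PySem.Dict.getD_of_not_contains (pvD d los) [] hcf] at hc
  simp at hc

theorem mem_getD_pvD_bounds (d : List (Int × Int × Int)) (los : List (List (Int × Int))) (e i : Int)
    (hi : i ∈ (pvD d los).getD e []) : 0 ≤ i ∧ i < (los.length : Int) := by
  rw [pvD, getD_pvBuildE, flatMap_enum, PySem.Dict.getD_empty, List.nil_append] at hi
  obtain ⟨q, hq, rfl⟩ := List.mem_map.mp hi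
  have hq' := (List.mem_filter.mp hq).1
  have h := pvLp_snd_bounds d los 0 q hq'
  omega

theorem length_pvTog (is : List Int) : ∀ par : List Int, (pvTog par is).length = par.length := by
  induction is with
  | nil => intro par; rfl
  | cons i t ih =>
    intro par
    show (pvTog (PySem.List.pySetD par i (1 - PySem.List.pyGetD par i 0)) t).length = par.length
    rw [ih, PySem.List.length_pySetD]

theorem getD_replicate_zero (n j : Nat) : (List.replicate n (0 : Int)).getD j 0 = 0 := by
  by_cases h : j < n
  · rw [List.getD_eq_getElem _ _ (by simpa), List.getElem_replicate]
  · rw [List.getD_eq_default _ _ (by simpa using Nat.le_of_not_lt h)]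

theorem getD_pvTog (is : List Int) :
    ∀ (par : List Int) (j : Nat), j < par.length → (∀ i ∈ is, 0 ≤ i ∧ i < (par.length : Int)) →
      (pvTog par is).getD j 0
        = if is.count ((j : Nat) : Int) % 2 = 1 then 1 - par.getD j 0 else par.getD j 0 := by
  induction is with
  | nil => intro par j hj _; simp [pvTog]
  | cons i t ih =>
    intro par j hj hb
    obtain ⟨h0, hlt⟩ := hb i List.mem_cons_self
    have hnat : i.toNat < par.length := by omega
    have hset : PySem.List.pySetD par i (1 - PySem.List.pyGetD par i 0)
        = par.set i.toNat (1 - par.getD i.toNat 0) := by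
      have hi : i = ((i.toNat : Nat) : Int) := by omega
      have hget : PySem.List.pyGetD par i 0 = par.getD i.toNat 0 := by
        conv_lhs => rw [hi, PySem.List.pyGetD_natCast]
      rw [PySem.List.pySetD_of_nonneg par _ h0, hget]
    have hstep : pvTog par (i :: t) = pvTog (par.set i.toNat (1 - par.getD i.toNat 0)) t := by
      show pvTog (PySem.List.pySetD par i (1 - PySem.List.pyGetD par i 0)) t = _
      rw [hset]
    rw [hstep, ih _ j (by rw [List.length_set]; exact hj)
      (by intro x hx; have := hb x (List.mem_cons_of_mem _ hx); rwa [List.length_set])]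
    by_cases hij : i.toNat = j
    · have hij' : i = ((j : Nat) : Int) := by omega
      have hgj : (par.set i.toNat (1 - par.getD i.toNat 0)).getD j 0 = 1 - par.getD j 0 := by
        subst hij
        rw [List.getD_eq_getElem _ _ (by rw [List.length_set]; exact hnat),
          List.getElem_set_self, List.getD_eq_getElem _ _ hnat]
      have hcount : (i :: t).count ((j : Nat) : Int) = t.count ((j : Nat) : Int) + 1 := by
        rw [List.count_cons]; simp [hij']
      rw [hgj, hcount]
      by_cases hp : t.count ((j : Nat) : Int) % 2 = 1
      · have hp2 : ¬ ((t.count ((j : Nat) : Int) + 1) % 2 = 1) := by omega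
        rw [if_pos hp, if_neg hp2]
        omega
      · have hp2 : (t.count ((j : Nat) : Int) + 1) % 2 = 1 := by omega
        rw [if_neg hp, if_pos hp2]
    · have hne : i ≠ ((j : Nat) : Int) := by omega
      have hgj : (par.set i.toNat (1 - par.getD i.toNat 0)).getD j 0 = par.getD j 0 := by
        rw [List.getD_eq_getElem?_getD, List.getElem?_set_ne hij, ← List.getD_eq_getElem?_getD]
      have hcount : (i :: t).count ((j : Nat) : Int) = t.count ((j : Nat) : Int) := by
        rw [List.count_cons]; simp [hne]
      rw [hgj, hcount]

theorem pvTog_flatMap (g : Int → List Int) (ls : List Int) :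
    ∀ par : List Int, ls.foldl (fun par e => pvTog par (g e)) par = pvTog par (ls.flatMap g) := by
  induction ls with
  | nil => intro par; rfl
  | cons e t ih =>
    intro par
    rw [List.foldl_cons, List.flatMap_cons, ih]
    show pvTog (pvTog par (g e)) (t.flatMap g) = pvTog par (g e ++ t.flatMap g)
    unfold pvTog
    rw [List.foldl_append]

theorem count_flat_ind (g : Int → List Int) (a : Int) (P : Int → Bool) :
    ∀ (ls : List Int), (∀ e ∈ ls, (g e).count a = if P e then 1 else 0) →
      (ls.flatMap g).count a = ls.countP P := by
  intro ls
  induction ls with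
  | nil => intro _; simp
  | cons e t ih =>
    intro h
    rw [List.flatMap_cons, List.count_append, ih (fun x hx => h x (List.mem_cons_of_mem _ hx)),
      h e List.mem_cons_self, List.countP_cons]
    omega

theorem length_eq_of_nodup_same_mem (l1 l2 : List Int) (h1 : l1.Nodup) (h2 : l2.Nodup)
    (h : ∀ x, x ∈ l1 ↔ x ∈ l2) : l1.length = l2.length :=
  ((List.perm_ext_iff_of_nodup h1 h2).mpr h).length_eq

theorem mem_pvSym_iff (d : List (Int × Int × Int)) (aff : List Int) (cps : List (List Int)) (x : Int) :
    x ∈ pvSym d aff cps ↔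
      (PySem.Set.contains (PySem.Set.ofList aff) x != PySem.Set.contains (pvCorr d cps) x) = true := by
  have hcf : ∀ (s : PySem.Set Int), x ∉ s → PySem.Set.contains s x = false := by
    intro s hs
    cases h' : PySem.Set.contains s x with
    | false => rfl
    | true => exact absurd ((PySem.Set.contains_iff s x).mp h') hs
  rw [pvSym, PySem.Set.mem_symmDiff]
  by_cases hA : x ∈ PySem.Set.ofList aff <;> by_cases hC : x ∈ pvCorr d cps
  · rw [(PySem.Set.contains_iff _ _).mpr hA, (PySem.Set.contains_iff _ _).mpr hC]
    simp [hA, hC]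
  · rw [(PySem.Set.contains_iff _ _).mpr hA, hcf _ hC]
    simp [hA, hC]
  · rw [hcf _ hA, (PySem.Set.contains_iff _ _).mpr hC]
    simp [hA, hC]
  · rw [hcf _ hA, hcf _ hC]
    simp [hA, hC]

theorem B_char (affected_edges : List Int) (correction_paths : List (List Int))
    (vertices_to_edges : List (Int × Int × Int)) (logical_operators : List (List (Int × Int))) :
    get_logical_error_alt affected_edges correction_paths vertices_to_edges logical_operators
      = logical_operators.any (fun op =>
          (PySem.Set.inter (pvSym vertices_to_edges affected_edges correction_paths)
            (pvOpSet vertices_to_edges op)).length % 2 == 1) := by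
  set d := vertices_to_edges
  set los := logical_operators
  set aff := affected_edges
  set cps := correction_paths
  set m : Int → Bool := fun e =>
    PySem.Set.contains (PySem.Set.ofList aff) e != PySem.Set.contains (pvCorr d cps) e with hm
  have h1 : get_logical_error_alt aff cps d los
      = ((pvD d los).keys.foldl
          (fun par e => if m e then pvTog par ((pvD d los).getD e []) else par)
          (List.replicate los.length 0)).any (fun p => !(p == 0)) := rfl
  rw [h1, PySem.List.foldl_if_eq_foldl_filter,
    pvTog_flatMap (fun e => (pvD d los).getD e []) ((pvD d los).keys.filter m)]
  set K := (pvD d los).keys with hK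
  set flat := (K.filter m).flatMap (fun e => (pvD d los).getD e []) with hflat
  set P := pvTog (List.replicate los.length 0) flat with hP
  have hbound : ∀ i ∈ flat, 0 ≤ i ∧ i < ((List.replicate los.length (0 : Int)).length : Int) := by
    intro i hi
    rw [List.length_replicate]
    obtain ⟨e, -, hie⟩ := List.mem_flatMap.mp hi
    exact mem_getD_pvD_bounds d los e i hie
  have hlenP : P.length = los.length := by rw [hP, length_pvTog, List.length_replicate]
  have hKnodup : K.Nodup := nodup_keys_pvBuildE d _ _ PySem.Dict.nodup_keys_empty
  have hSymNodup : (pvSym d aff cps).Nodup :=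
    PySem.Set.nodup_symmDiff _ _ (nodup_pvCorr d cps) (PySem.Set.nodup_ofList aff)
  have hentry : ∀ j : Nat, j < los.length →
      P.getD j 0 = if flat.count ((j : Nat) : Int) % 2 = 1 then 1 else 0 := by
    intro j hj
    rw [hP, getD_pvTog flat _ j (by simpa) hbound, getD_replicate_zero]
    by_cases hc : flat.count ((j : Nat) : Int) % 2 = 1
    · rw [if_pos hc, if_pos hc]; norm_num
    · rw [if_neg hc, if_neg hc]
  have hcount : ∀ j : Nat, j < los.length →
      flat.count ((j : Nat) : Int)
        = (PySem.Set.inter (pvSym d aff cps) (pvOpSet d (los.getD j []))).length := by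
    intro j hj
    have hstep1 : flat.count ((j : Nat) : Int)
        = (K.filter m).countP (fun e => PySem.Set.contains (pvOpSet d (los.getD j [])) e) := by
      apply count_flat_ind
      intro e _
      rw [count_getD_pvD d los e j]
      by_cases hmem : e ∈ pvOpSet d (los.getD j [])
      · rw [if_pos ⟨hj, hmem⟩, if_pos ((PySem.Set.contains_iff _ _).mpr hmem)]
      · rw [if_neg (by rintro ⟨-, h⟩; exact hmem h),
          if_neg (by intro h; exact hmem ((PySem.Set.contains_iff _ _).mp h))]
    rw [hstep1, List.countP_eq_length_filter]
    apply length_eq_of_nodup_same_mem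
    · exact (hKnodup.filter m).filter _
    · exact PySem.Set.nodup_inter _ _ hSymNodup
    · intro x
      rw [List.mem_filter, List.mem_filter, PySem.Set.mem_inter]
      constructor
      · rintro ⟨⟨hxK, hxm⟩, hxo⟩
        exact ⟨(mem_pvSym_iff d aff cps x).mpr hxm, (PySem.Set.contains_iff _ _).mp hxo⟩
      · rintro ⟨hxs, hxo⟩
        exact ⟨⟨mem_keys_pvD d los j hj x hxo, (mem_pvSym_iff d aff cps x).mp hxs⟩,
          (PySem.Set.contains_iff _ _).mpr hxo⟩
  rw [Bool.eq_iff_iff, List.any_eq_true, List.any_eq_true]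
  constructor
  · rintro ⟨p, hp, hpne⟩
    obtain ⟨j, hjlen, rfl⟩ := List.mem_iff_getElem.mp hp
    have hjlos : j < los.length := by rwa [hlenP] at hjlen
    have hgd : P.getD j 0 = P[j] := List.getD_eq_getElem P 0 hjlen
    refine ⟨los[j], List.getElem_mem hjlos, ?_⟩
    rw [← List.getD_eq_getElem los [] hjlos]
    have := hentry j hjlos
    rw [hgd] at this
    by_cases hc : flat.count ((j : Nat) : Int) % 2 = 1
    · rw [beq_iff_eq, ← hcount j hjlos]; exact hc
    · rw [this, if_neg hc] at hpne; simp at hpne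
  · rintro ⟨op, hop, hodd⟩
    obtain ⟨j, hjlos, rfl⟩ := List.mem_iff_getElem.mp hop
    refine ⟨P.getD j 0, ?_, ?_⟩
    · rw [List.getD_eq_getElem P 0 (by rwa [hlenP])]
      exact List.getElem_mem _
    · rw [hentry j hjlos]
      have : flat.count ((j : Nat) : Int) % 2 = 1 := by
        rw [hcount j hjlos, List.getD_eq_getElem los [] hjlos]
        exact beq_iff_eq.mp hodd
      rw [if_pos this]
      simp

theorem get_logical_error_spec : Claim_equal_get_logical_error := by
  intro affected_edges correction_paths vertices_to_edges logical_operators _ _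
  unfold Spec_get_logical_error
  rw [A_eq, B_char]
  by_cases h : PySem.Set.equal (pvCorr vertices_to_edges correction_paths) (PySem.Set.ofList affected_edges) = true
  · rw [if_pos h]
    symm
    rw [List.any_eq_false]
    intro op _
    have hempty : PySem.Set.inter (pvSym vertices_to_edges affected_edges correction_paths)
        (pvOpSet vertices_to_edges op) = [] := by
      rw [List.eq_nil_iff_forall_not_mem]
      intro x hx
      rw [PySem.Set.mem_inter] at hx
      have hxs := hx.1
      rw [pvSym, PySem.Set.mem_symmDiff] at hxs
      have hiff := (PySem.Set.equal_iff _ _).mp h x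
      tauto
    simp [hempty]
  · rw [if_neg h]
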